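-- pv_equiv track=rewrite | github.com/gandhi56/Competitive-Programming | kattis/digitsum/sum.py | solve
-- ===== SOURCE A (Python) =====
-- dp = {}
--
-- def solve(n):
-- 	if n in dp:
-- 		return dp[n]
-- 	if n <= 0:
-- 		dp[n] = 0; return dp[n]
-- 	if n%10 == 0:
-- 		dp[n] = 10 * solve(n//10) + 45 * (n//10); return dp[n]
-- 	else:
-- 		dp[n] = solve(n-1) + sum(int(x) for x in str(n-1))
-- 	return dp[n]
-- ===== SOURCE B (Python) =====
-- def solve(n):
--     # Closed-form digit-position sum: sum of digit sums of 0..n-1 in one O(log n) loop.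
--     # (A also memoizes results in a global dict; B is pure -- return values agree.)
--     if n <= 0:
--         return 0
--     x = n - 1
--     total = 0
--     p = 1
--     while p <= x:
--         higher = x // (10 * p)
--         cur = (x // p) % 10
--         lower = x % p
--         total += higher * 45 * p + cur * (cur - 1) // 2 * p + cur * (lower + 1)
--         p *= 10
--     return total
-- ===== Notes on version B (the rewrite author's own statement) =====
-- stated objective: alternative
-- what changed: Replaced the memoized recursion (global dict, recursive decade identity plus per-step string digit sums) with a single non-recursive closed-form loop over decimal positions of n-1, each position contributing higher*45*p + cur*(cur-1)//2*p + cur*(lower+1); B is pure (no global memo mutation).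
import Mathlib
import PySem

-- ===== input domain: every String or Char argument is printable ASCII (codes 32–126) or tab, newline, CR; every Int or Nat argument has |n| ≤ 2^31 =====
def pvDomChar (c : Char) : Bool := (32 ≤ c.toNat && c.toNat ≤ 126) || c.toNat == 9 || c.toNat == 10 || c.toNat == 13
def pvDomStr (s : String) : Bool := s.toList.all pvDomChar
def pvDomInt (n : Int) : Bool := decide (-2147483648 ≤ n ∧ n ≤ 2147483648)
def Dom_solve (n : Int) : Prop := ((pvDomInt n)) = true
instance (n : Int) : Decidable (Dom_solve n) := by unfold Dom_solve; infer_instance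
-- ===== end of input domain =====

-- B replaces A's memoized recursion by a closed-form loop over decimal digit positions
-- (an alternative non-recursive algorithm; return values proved equal, A's global memo dropped).


-- ===== PORT A =====
-- literal port of A's recursion; the global memo dict only caches results and never
-- changes the returned value, so the port is the memoised recurrence itself.
-- sum(int(x) for x in str(n-1)): n-1 ≥ 0 here, so every character is a digit and
-- int(x) never raises; (PySem.Int.ofChars? [c]).getD 0 is exact on these characters.
def solve (n : Int) : Int :=
  if _h0 : n ≤ 0 then 0
  else if PySem.Int.mod n 10 = 0 then
    10 * solve (PySem.Int.floordiv n 10) + 45 * (PySem.Int.floordiv n 10)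
  else
    solve (n - 1) + ((PySem.Int.toChars (n - 1)).map (fun c => (PySem.Int.ofChars? [c]).getD 0)).sum
termination_by n.toNat
decreasing_by
  · rw [PySem.Int.floordiv_eq_ediv_of_pos (a := n) (b := 10) (by omega)]
    omega
  · omega

-- ===== PORT B =====
-- the while-loop of Source B; the extra `1 ≤ p` conjunct only certifies termination
-- (the loop is entered with p = 1 and p is only ever multiplied by 10).
def altLoop (x p total : Int) : Int :=
  if h : 1 ≤ p ∧ p ≤ x then
    altLoop x (p * 10)
      (total + PySem.Int.floordiv x (10 * p) * 45 * p
             + PySem.Int.floordiv (PySem.Int.mod (PySem.Int.floordiv x p) 10 *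
                 (PySem.Int.mod (PySem.Int.floordiv x p) 10 - 1)) 2 * p
             + PySem.Int.mod (PySem.Int.floordiv x p) 10 * (PySem.Int.mod x p + 1))
  else total
termination_by (x + 1 - p).toNat
decreasing_by omega

def solve_alt (n : Int) : Int :=
  if n ≤ 0 then 0 else altLoop (n - 1) 1 0

-- ===== PRECONDITION & SPEC =====
def Spec_solve (n : Int) (out : Int) : Prop := out = solve_alt n
instance (n : Int) (out : Int) : Decidable (Spec_solve n out) := by unfold Spec_solve; infer_instance

-- ===== CLAIM (what is proved, stated in full; the proofs are below) =====
def Claim_equal_solve : Prop := ∀ (n : Int), Dom_solve n → Spec_solve n (solve n)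

-- ===== LEMMAS AND PROOFS =====

-- digit sum of a natural number
def dsN (m : Nat) : Nat := (Nat.digits 10 m).sum

-- sum of digit sums of 0..k-1
def SN (k : Nat) : Nat := ∑ i ∈ Finset.range k, dsN i

-- sum, over 0..x, of the decimal digit at position p (p a power of ten)
def TN (p x : Nat) : Nat := ∑ k ∈ Finset.range (x + 1), k / p % 10

lemma dsN_rec (m : Nat) (hm : 0 < m) : dsN m = m % 10 + dsN (m / 10) := by
  unfold dsN
  rw [Nat.digits_def' (by norm_num : 1 < 10) hm]
  simp

lemma dsN_add_digit (m r : Nat) (hr : r < 10) : dsN (10 * m + r) = dsN m + r := by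
  rcases Nat.eq_zero_or_pos (10 * m + r) with h | h
  · have hm : m = 0 := by omega
    have hr0 : r = 0 := by omega
    simp [hm, hr0, dsN]
  · rw [dsN_rec _ h]
    have h1 : (10 * m + r) % 10 = r := by omega
    have h2 : (10 * m + r) / 10 = m := by omega
    rw [h1, h2]; ring

lemma SN_succ (k : Nat) : SN (k + 1) = SN k + dsN k := Finset.sum_range_succ _ _

lemma SN_mul10 (m : Nat) : SN (10 * m) = 10 * SN m + 45 * m := by
  induction m with
  | zero => simp [SN]
  | succ m ih =>
    have h : 10 * (m + 1) = 10 * m + 10 := by ring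
    rw [h]
    have expand : SN (10 * m + 10) = SN (10 * m) + ∑ j ∈ Finset.range 10, dsN (10 * m + j) := by
      unfold SN
      rw [Finset.sum_range_add]
    rw [expand, ih]
    have hsum : ∑ j ∈ Finset.range 10, dsN (10 * m + j) = 10 * dsN m + 45 := by
      have : ∀ j ∈ Finset.range 10, dsN (10 * m + j) = dsN m + j := by
        intro j hj
        exact dsN_add_digit m j (Finset.mem_range.mp hj)
      rw [Finset.sum_congr rfl this, Finset.sum_add_distrib]
      have h45 : ∑ j ∈ Finset.range 10, j = 45 := by decide
      simp [h45, Finset.sum_const, Finset.card_range]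
    rw [hsum, SN_succ]
    ring

-- ===== A side =====

-- single digit character round-trips through int(x)
lemma ofChars_digitChar (d : Nat) (hd : d < 10) :
    (PySem.Int.ofChars? [Nat.digitChar d]).getD 0 = (d : Int) := by
  interval_cases d <;> decide

-- Nat.toDigitsCore writes the reversed digit list
lemma toDigitsCore_eq (f : Nat) : ∀ (m : Nat) (l : List Char), m < f → 0 < m →
    Nat.toDigitsCore 10 f m l = ((Nat.digits 10 m).map Nat.digitChar).reverse ++ l := by
  induction f with
  | zero => intro m l hm; omega
  | succ f ih =>
    intro m l hm hpos
    rw [Nat.toDigitsCore]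
    rw [Nat.digits_def' (by norm_num : 1 < 10) hpos]
    by_cases h10 : m / 10 = 0
    · simp [h10]
    · simp only [h10, if_false]
      rw [ih (m / 10) _ (by omega) (by omega)]
      simp

-- the string digit sum computed by port A equals dsN
lemma sum_map_digits (l : List Nat) (hl : ∀ d ∈ l, d < 10) :
    (l.map (fun d => (PySem.Int.ofChars? [Nat.digitChar d]).getD 0)).sum = (l.sum : Int) := by
  induction l with
  | nil => simp
  | cons d t ih =>
    simp only [List.map_cons, List.sum_cons, List.sum_cons]
    rw [ofChars_digitChar d (hl d (by simp)), ih (fun e he => hl e (by simp [he]))]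
    push_cast
    ring

lemma digitSum_bridge (m : Nat) :
    ((PySem.Int.toChars (m : Int)).map (fun c => (PySem.Int.ofChars? [c]).getD 0)).sum
      = (dsN m : Int) := by
  rcases Nat.eq_zero_or_pos m with rfl | hm
  · decide
  · have h1 : PySem.Int.toChars (m : Int) = Nat.toDigits 10 m := by
      unfold PySem.Int.toChars
      rw [if_neg (by omega)]
      simp
    rw [h1]
    unfold Nat.toDigits
    rw [toDigitsCore_eq (m + 1) m [] (by omega) hm]
    rw [List.append_nil, List.map_reverse, List.sum_reverse, List.map_map]
    have := sum_map_digits (Nat.digits 10 m) (fun d hd => Nat.digits_lt_base (by norm_num) hd)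
    simpa [dsN, Function.comp] using this

-- port A computes SN
lemma solve_eq_SN : ∀ m : Nat, solve (m : Int) = (SN m : Int) := by
  intro m
  induction m using Nat.strong_induction_on with
  | _ m ih =>
    rw [solve]
    rcases Nat.eq_zero_or_pos m with rfl | hm
    · simp [SN]
    · rw [dif_neg (by exact_mod_cast Nat.not_succ_le_zero 0 ∘ fun h => absurd h (by omega) : ¬ ((m : Int) ≤ 0))]
      have hmod : PySem.Int.mod (m : Int) 10 = ((m % 10 : Nat) : Int) := by
        exact_mod_cast PySem.Int.mod_natCast m 10
      have hfd : PySem.Int.floordiv (m : Int) 10 = ((m / 10 : Nat) : Int) := by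
        exact_mod_cast PySem.Int.floordiv_natCast m 10
      by_cases hd : m % 10 = 0
      · rw [if_pos (by rw [hmod, hd]; simp), hfd,
          ih (m / 10) (Nat.div_lt_self hm (by norm_num))]
        have hme : 10 * (m / 10) = m := Nat.mul_div_cancel' (Nat.dvd_of_mod_eq_zero hd)
        have := SN_mul10 (m / 10)
        rw [hme] at this
        rw [this]
        push_cast
        ring
      · rw [if_neg (by rw [hmod]; exact_mod_cast hd)]
        have hm1 : (m : Int) - 1 = ((m - 1 : Nat) : Int) := by omega
        rw [hm1, ih (m - 1) (by omega), digitSum_bridge (m - 1)]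
        have hS : SN m = SN (m - 1) + dsN (m - 1) := by
          have := SN_succ (m - 1)
          rw [Nat.sub_add_cancel hm] at this
          rw [this]
        rw [hS]
        push_cast
        ring

-- ===== B side =====

-- the per-position closed form in Nat
def gN (p x : Nat) : Nat :=
  x / (10 * p) * 45 * p + (x / p % 10) * (x / p % 10 - 1) / 2 * p + (x / p % 10) * (x % p + 1)

lemma TN_succ (p x : Nat) : TN p (x + 1) = TN p x + (x + 1) / p % 10 :=
  Finset.sum_range_succ _ _

lemma gN_step (p x : Nat) (hp : 0 < p) : gN p (x + 1) = gN p x + (x + 1) / p % 10 := by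
  set h := x / (10 * p) with hh
  set c := x / p % 10 with hc
  set l := x % p with hl
  have hc10 : c < 10 := Nat.mod_lt _ (by norm_num)
  have hlp : l < p := Nat.mod_lt _ hp
  have hdiv10 : ∀ y : Nat, y / (10 * p) = y / p / 10 := by
    intro y
    rw [Nat.div_div_eq_div_mul, Nat.mul_comm]
  have hxp : x / p = 10 * h + c := by
    rw [hh, hc, hdiv10 x]
    omega
  have hx : x = p * (10 * h + c) + l := by
    rw [← hxp, hl]
    exact (Nat.div_add_mod x p).symm
  rcases Nat.lt_or_ge (l + 1) p with hA | hB
  · -- no carry: lower digit group not full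
    have e1 : x + 1 = p * (10 * h + c) + (l + 1) := by omega
    have d1 : (x + 1) / p = 10 * h + c := by
      rw [e1, Nat.mul_add_div hp, Nat.div_eq_of_lt hA]; omega
    have d2 : (x + 1) % p = l + 1 := by
      rw [e1, Nat.mul_add_mod, Nat.mod_eq_of_lt hA]
    have d3 : (x + 1) / p % 10 = c := by
      rw [d1, Nat.mul_add_mod, Nat.mod_eq_of_lt hc10]
    have d4 : (x + 1) / (10 * p) = h := by
      rw [hdiv10 (x + 1), d1, Nat.mul_add_div (by norm_num : 0 < 10), Nat.div_eq_of_lt hc10]; omega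
    unfold gN
    rw [d2, d3, d4]
    generalize c * (c - 1) / 2 = q
    ring
  · have hlp1 : l + 1 = p := by omega
    rcases Nat.lt_or_ge c 9 with hc9 | hc9'
    · -- carry into the digit at position p, no carry beyond
      have e1 : x + 1 = p * (10 * h + (c + 1)) := by
        calc x + 1 = p * (10 * h + c) + (l + 1) := by omega
        _ = p * (10 * h + c) + p := by rw [hlp1]
        _ = p * (10 * h + (c + 1)) := by ring
      have d1 : (x + 1) / p = 10 * h + (c + 1) := by
        rw [e1, Nat.mul_div_cancel_left _ hp]
      have d2 : (x + 1) % p = 0 := by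
        rw [e1, Nat.mul_mod_right]
      have d3 : (x + 1) / p % 10 = c + 1 := by
        rw [d1, Nat.mul_add_mod, Nat.mod_eq_of_lt (by omega)]
      have d4 : (x + 1) / (10 * p) = h := by
        rw [hdiv10 (x + 1), d1, Nat.mul_add_div (by norm_num : 0 < 10),
          Nat.div_eq_of_lt (by omega)]; omega
      unfold gN
      rw [d2, d3, d4]
      have hq : (c + 1) * (c + 1 - 1) / 2 = c * (c - 1) / 2 + c := by
        interval_cases c <;> norm_num
      rw [hq, hlp1]
      ring
    · -- c = 9: the whole decade rolls over
      have hc9 : c = 9 := by omega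
      have e1 : x + 1 = 10 * p * (h + 1) := by
        calc x + 1 = p * (10 * h + 9) + p := by rw [hc9] at hx; omega
        _ = 10 * p * (h + 1) := by ring
      have d1 : (x + 1) / p = 10 * (h + 1) := by
        have e2 : x + 1 = p * (10 * (h + 1)) := by rw [e1]; ring
        rw [e2, Nat.mul_div_cancel_left _ hp]
      have d2 : (x + 1) % p = 0 := by
        have e2 : x + 1 = p * (10 * (h + 1)) := by rw [e1]; ring
        rw [e2, Nat.mul_mod_right]
      have d3 : (x + 1) / p % 10 = 0 := by
        rw [d1, Nat.mul_mod_right]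
      have d4 : (x + 1) / (10 * p) = h + 1 := by
        rw [e1, Nat.mul_div_cancel_left _ (by omega : 0 < 10 * p)]
      unfold gN
      rw [← hh, ← hc, ← hl, d2, d3, d4, hc9, hlp1]
      norm_num
      ring

lemma gN_eq_TN (p x : Nat) (hp : 0 < p) : gN p x = TN p x := by
  induction x with
  | zero => simp [gN, TN, Nat.div_eq_of_lt hp]
  | succ x ih => rw [TN_succ, ← ih, gN_step p x hp]

lemma TN_zero_of_big (p x : Nat) (h : x < p) : TN p x = 0 := by
  unfold TN
  apply Finset.sum_eq_zero
  intro k hk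
  have : k < p := by
    have := Finset.mem_range.mp hk
    omega
  simp [Nat.div_eq_of_lt this]

-- the Int body of altLoop equals gN
lemma body_eq_gN (p x : Nat) :
    PySem.Int.floordiv (x : Int) (10 * (p : Int)) * 45 * (p : Int)
      + PySem.Int.floordiv (PySem.Int.mod (PySem.Int.floordiv (x : Int) (p : Int)) 10 *
          (PySem.Int.mod (PySem.Int.floordiv (x : Int) (p : Int)) 10 - 1)) 2 * (p : Int)
      + PySem.Int.mod (PySem.Int.floordiv (x : Int) (p : Int)) 10 * (PySem.Int.mod (x : Int) (p : Int) + 1)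
      = (gN p x : Int) := by
  have h10p : (10 : Int) * (p : Int) = ((10 * p : Nat) : Int) := by push_cast; ring
  have hfd1 : PySem.Int.floordiv (x : Int) ((10 * p : Nat) : Int) = ((x / (10 * p) : Nat) : Int) :=
    PySem.Int.floordiv_natCast x (10 * p)
  have hfd2 : PySem.Int.floordiv (x : Int) (p : Int) = ((x / p : Nat) : Int) :=
    PySem.Int.floordiv_natCast x p
  have hmod10 : PySem.Int.mod ((x / p : Nat) : Int) 10 = ((x / p % 10 : Nat) : Int) := by
    exact_mod_cast PySem.Int.mod_natCast (x / p) 10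
  have hmodp : PySem.Int.mod (x : Int) (p : Int) = ((x % p : Nat) : Int) :=
    PySem.Int.mod_natCast x p
  set c := x / p % 10 with hcdef
  have hc2 : PySem.Int.floordiv ((c : Int) * ((c : Int) - 1)) 2 = ((c * (c - 1) / 2 : Nat) : Int) := by
    rcases Nat.eq_zero_or_pos c with hc0 | hcpos
    · rw [hc0]
      decide
    · have h1 : (c : Int) - 1 = ((c - 1 : Nat) : Int) := by omega
      rw [h1]
      exact_mod_cast PySem.Int.floordiv_natCast (c * (c - 1)) 2
  rw [h10p, hfd1, hfd2, hmod10, hmodp, hc2]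
  unfold gN
  rw [← hcdef]
  push_cast
  ring

lemma altLoop_eq (B : Nat) : ∀ (p x : Nat) (total : Int), 0 < p → x < p * 10 ^ B →
    altLoop (x : Int) (p : Int) total = total + (∑ j ∈ Finset.range B, TN (p * 10 ^ j) x : Nat) := by
  induction B with
  | zero =>
    intro p x total hp hx
    rw [altLoop, dif_neg (by exact_mod_cast (by omega : ¬ (1 ≤ p ∧ p ≤ x)))]
    simp
  | succ B ih =>
    intro p x total hp hx
    by_cases hpx : p ≤ x
    · rw [altLoop, dif_pos ⟨by exact_mod_cast hp, by exact_mod_cast hpx⟩]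
      have hc : (p : Int) * 10 = ((p * 10 : Nat) : Int) := by push_cast; ring
      rw [hc, ih (p * 10) x _ (by omega) (by
        have : p * 10 * 10 ^ B = p * 10 ^ (B + 1) := by ring
        omega)]
      have hbody := body_eq_gN p x
      rw [gN_eq_TN p x hp] at hbody
      have hsplit : (∑ j ∈ Finset.range (B + 1), TN (p * 10 ^ j) x)
          = (∑ j ∈ Finset.range B, TN (p * 10 * 10 ^ j) x) + TN p x := by
        rw [Finset.sum_range_succ']
        congr 1
        · apply Finset.sum_congr rfl
          intro j _
          congr 1
          ring
        · simp
      rw [hsplit]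
      push_cast
      linear_combination hbody
    · rw [altLoop, dif_neg (by omega)]
      have : ∀ j ∈ Finset.range (B + 1), TN (p * 10 ^ j) x = 0 := by
        intro j _
        apply TN_zero_of_big
        have h1 : p ≤ p * 10 ^ j := Nat.le_mul_of_pos_right _ (Nat.pow_pos (by norm_num))
        omega
      rw [Finset.sum_congr rfl this]
      simp

-- summing the positional sums gives SN
lemma sum_TN (B x : Nat) (h : x < 10 ^ B) :
    (∑ j ∈ Finset.range B, TN (10 ^ j) x) = SN (x + 1) := by
  unfold TN SN
  rw [Finset.sum_comm]
  apply Finset.sum_congr rfl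
  intro k hk
  have hkB : k < 10 ^ B := by
    have := Finset.mem_range.mp hk
    omega
  clear hk h
  induction B generalizing k with
  | zero =>
    have : k = 0 := by simpa using hkB
    simp [this, dsN]
  | succ B ih =>
    rcases Nat.eq_zero_or_pos k with rfl | hkpos
    · simp [dsN]
    · rw [Finset.sum_range_succ']
      have hstep : ∀ j, k / 10 ^ (j + 1) = k / 10 / 10 ^ j := by
        intro j
        rw [Nat.div_div_eq_div_mul, pow_succ']
      have hdivB : k / 10 < 10 ^ B := by
        rw [Nat.div_lt_iff_lt_mul (by norm_num)]
        have : 10 ^ B * 10 = 10 ^ (B + 1) := by rw [pow_succ]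
        omega
      calc (∑ j ∈ Finset.range B, k / 10 ^ (j + 1) % 10) + k / 10 ^ 0 % 10
          = (∑ j ∈ Finset.range B, (k / 10) / 10 ^ j % 10) + k % 10 := by
            simp [hstep]
        _ = dsN (k / 10) + k % 10 := by rw [ih _ hdivB]
        _ = dsN k := by rw [dsN_rec k hkpos]; ring

lemma solve_alt_eq_SN : ∀ m : Nat, solve_alt (m : Int) = (SN m : Int) := by
  intro m
  rcases Nat.eq_zero_or_pos m with rfl | hm
  · simp [solve_alt, SN]
  · rw [solve_alt, if_neg (by exact_mod_cast Nat.not_succ_le_zero 0 ∘ fun h => absurd h (by omega) : ¬ ((m : Int) ≤ 0))]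
    have hm1 : (m : Int) - 1 = ((m - 1 : Nat) : Int) := by omega
    have hone : (1 : Int) = ((1 : Nat) : Int) := by norm_num
    have hpow : m - 1 < 1 * 10 ^ m := by
      have := Nat.lt_pow_self (by norm_num : 1 < 10) (n := m)
      omega
    rw [hm1, hone, altLoop_eq m 1 (m - 1) 0 (by norm_num) hpow]
    rw [zero_add]
    have : (∑ j ∈ Finset.range m, TN (1 * 10 ^ j) (m - 1)) = SN m := by
      have h1 : ∀ j, 1 * 10 ^ j = 10 ^ j := fun j => one_mul _
      simp only [h1]
      rw [sum_TN m (m - 1) (by omega)]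
      congr 1
      omega
    rw [this]

-- ===== VERDICT (by name: the statement is the Claim_ definition above) =====
theorem solve_spec : Claim_equal_solve := by
  intro n _
  unfold Spec_solve
  by_cases h : n ≤ 0
  · rw [solve, solve_alt]
    simp [h]
  · have hn : n = (n.toNat : Int) := by omega
    rw [hn, solve_eq_SN, solve_alt_eq_SN]
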